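-- pv_equiv track=rewrite | github.com/hpc-maths/ponio | ponio/code_generator.py | label_to_id
-- ===== SOURCE A (Python) =====
-- def label_to_id(label: str):
--     r = label.lower()
--     replacements = [
--         (" ", "_"),
--         ("(", ""),
--         (")", ""),
--         (",", ""),
--         ("-", ""),
--         ("/", ""),
--     ]
--     for old, new in replacements:
--         r = r.replace(old, new)
--     return r
-- ===== SOURCE B (Python) =====
-- def label_to_id(label: str):
--     table = {" ": "_", "(": "", ")": "", ",": "", "-": "", "/": ""}
--     return "".join(table.get(c, c) for c in label.lower())
-- ===== Notes on version B (the rewrite author's own statement) =====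
-- stated objective: alternative
-- what changed: B lowercases once and makes a single pass over the characters with a fixed translation table (space->'_', the five punctuation chars dropped), instead of A's six sequential full-string replace scans.
import Mathlib
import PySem

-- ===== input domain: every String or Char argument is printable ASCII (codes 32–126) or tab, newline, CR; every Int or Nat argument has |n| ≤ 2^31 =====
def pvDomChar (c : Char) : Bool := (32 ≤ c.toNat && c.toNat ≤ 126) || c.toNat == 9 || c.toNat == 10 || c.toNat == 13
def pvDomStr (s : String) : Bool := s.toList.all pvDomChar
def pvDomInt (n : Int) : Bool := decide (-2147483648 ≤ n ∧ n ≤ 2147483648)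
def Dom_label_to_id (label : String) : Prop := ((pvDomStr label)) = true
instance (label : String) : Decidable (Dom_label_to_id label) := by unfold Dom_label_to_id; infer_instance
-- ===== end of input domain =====

-- B lowercases once and makes a single pass with a fixed translation table instead of A's six sequential replace scans.

-- ===== PORT A =====
def label_to_id (label : String) : String :=
  let r := PySem.Str.lower label
  let replacements : List (String × String) :=
    [(" ", "_"), ("(", ""), (")", ""), (",", ""), ("-", ""), ("/", "")]
  replacements.foldl (fun r p => PySem.Str.replace r p.1 p.2) r

-- ===== PORT B =====
-- table = {" ": "_", "(": "", ")": "", ",": "", "-": "", "/": ""}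
def pvTable : PySem.Dict Char String :=
  ((((((PySem.Dict.empty).insert ' ' "_").insert '(' "").insert ')' "").insert ',' "").insert '-' "").insert '/' ""

-- "".join(table.get(c, c) for c in label.lower())
def label_to_id_alt (label : String) : String :=
  PySem.Str.join "" (((PySem.Str.lower label).toList).map (fun c => pvTable.getD c (String.ofList [c])))

-- ===== PRECONDITION & SPEC =====
def Spec_label_to_id (label : String) (out : String) : Prop := out = label_to_id_alt label
instance (label : String) (out : String) : Decidable (Spec_label_to_id label out) := by unfold Spec_label_to_id; infer_instance

-- ===== CLAIM (what is proved, stated in full; the proofs are below) =====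
def Claim_equal_label_to_id : Prop := ∀ (label : String), Dom_label_to_id label → Spec_label_to_id label (label_to_id label)

-- ===== LEMMAS AND PROOFS =====

-- replace by a single character = a flatMap over the characters
theorem pv_go_single (a : Char) (ns : List Char) :
    ∀ (fuel : Nat) (l acc : List Char), l.length ≤ fuel →
      PySem.Chars.replace.go [a] ns fuel l acc
        = acc.reverse ++ l.flatMap (fun c => if c = a then ns else [c]) := by
  intro fuel
  induction fuel with
  | zero =>
    intro l acc h
    have : l = [] := List.eq_nil_of_length_eq_zero (Nat.le_zero.mp h)
    subst this
    simp [PySem.Chars.replace.go]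
  | succ n ih =>
    intro l acc h
    cases l with
    | nil => simp [PySem.Chars.replace.go]
    | cons c t =>
      simp only [PySem.Chars.replace.go]
      by_cases hca : c = a
      · subst hca
        have hpre : List.isPrefixOf [c] (c :: t) = true := by
          simp [List.isPrefixOf]
        simp only [hpre, if_true]
        rw [ih _ _ (by simpa using Nat.le_of_succ_le_succ h)]
        simp
      · have hpre : List.isPrefixOf [a] (c :: t) = false := by
          simp [List.isPrefixOf]
          exact fun h' => hca h'.symm
        simp only [hpre, Bool.false_eq_true, if_false]
        rw [ih _ _ (by simpa using Nat.le_of_succ_le_succ h)]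
        simp [hca]

theorem pv_replace_single (a : Char) (ns s : List Char) :
    PySem.Chars.replace s [a] ns = s.flatMap (fun c => if c = a then ns else [c]) := by
  rw [PySem.Chars.replace]
  rw [if_neg (by simp)]
  simpa using pv_go_single a ns s.length s [] (le_refl _)

-- the per-character value of A's six composed replacements
def pvF (c : Char) : List Char :=
  (((((((if c = ' ' then ['_'] else [c]).flatMap
      (fun c => if c = '(' then [] else [c])).flatMap
      (fun c => if c = ')' then [] else [c])).flatMap
      (fun c => if c = ',' then [] else [c])).flatMap
      (fun c => if c = '-' then [] else [c])).flatMap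
      (fun c => if c = '/' then [] else [c])))

theorem pv_table_eq (c : Char) : (pvTable.getD c (String.ofList [c])).toList = pvF c := by
  by_cases h1 : c = ' '; · subst h1; decide
  by_cases h2 : c = '('; · subst h2; decide
  by_cases h3 : c = ')'; · subst h3; decide
  by_cases h4 : c = ','; · subst h4; decide
  by_cases h5 : c = '-'; · subst h5; decide
  by_cases h6 : c = '/'; · subst h6; decide
  have : pvTable.getD c (String.ofList [c]) = String.ofList [c] := by
    simp [pvTable, PySem.Dict.getD_insert, h1, h2, h3, h4, h5, h6]
  rw [this]
  rw [String.toList_ofList]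
  simp [pvF, h1, h2, h3, h4, h5, h6]

theorem pv_join_nil (parts : List (List Char)) :
    PySem.Chars.join [] parts = parts.flatten := by
  induction parts with
  | nil => rfl
  | cons p ps ih =>
    cases ps with
    | nil => simp [PySem.Chars.join, List.intercalate]
    | cons q qs =>
      simp [PySem.Chars.join, List.intercalate] at ih ⊢
      simpa using ih

-- ===== VERDICT (by name: the statement is the Claim_ definition above) =====
theorem label_to_id_spec : Claim_equal_label_to_id := by
  intro label _
  unfold Spec_label_to_id
  have h : (label_to_id label).toList = (label_to_id_alt label).toList := by
    unfold label_to_id label_to_id_alt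
    simp only [List.foldl, PySem.Str.toList_replace, PySem.Str.toList_join]
    have hsp : (" " : String).toList = [' '] := rfl
    have h1 : ("_" : String).toList = ['_'] := rfl
    have h2 : ("(" : String).toList = ['('] := rfl
    have h3 : (")" : String).toList = [')'] := rfl
    have h4 : ("," : String).toList = [','] := rfl
    have h5 : ("-" : String).toList = ['-'] := rfl
    have h6 : ("/" : String).toList = ['/'] := rfl
    have h0 : ("" : String).toList = [] := rfl
    rw [hsp, h1, h2, h3, h4, h5, h6, h0, pv_join_nil]
    simp only [pv_replace_single, List.flatMap_assoc]
    rw [List.flatten_eq_flatMap]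
    simp only [List.flatMap_map, id]
    refine List.flatMap_congr ?_
    intro c _
    rw [pv_table_eq]
    simp only [pvF, List.flatMap_assoc]
  calc label_to_id label = String.ofList (label_to_id label).toList := String.ofList_toList.symm
    _ = String.ofList (label_to_id_alt label).toList := by rw [h]
    _ = label_to_id_alt label := String.ofList_toList
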